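-- pv_equiv track=rewrite | github.com/OdinYkt/hermes-a2a | plugin/__init__.py | _is_mid_conversation
-- ===== SOURCE A (Python) =====
-- def _is_mid_conversation(messages) -> bool:
--     """Check if the agent is mid-conversation (last user message has no assistant reply yet)."""
--     if not messages or not isinstance(messages, list):
--         return False
--     for msg in reversed(messages):
--         if not isinstance(msg, dict):
--             continue
--         role = msg.get("role", "")
--         if role == "assistant":
--             return False
--         if role == "user":
--             content = msg.get("content", "")
--             if isinstance(content, str) and not content.startswith("[A2A"):
--                 return True
--     return False
-- ===== SOURCE B (Python) =====
-- def _is_mid_conversation(messages) -> bool: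
--     """Check if the agent is mid-conversation (last user message has no assistant reply yet)."""
--     if not messages or not isinstance(messages, list):
--         return False
--     last_user = -1
--     last_assistant = -1
--     for i, msg in enumerate(messages):
--         if not isinstance(msg, dict):
--             continue
--         role = msg.get("role", "")
--         if role == "assistant":
--             last_assistant = i
--         elif role == "user":
--             content = msg.get("content", "")
--             if isinstance(content, str) and not content.startswith("[A2A"):
--                 last_user = i
--     return last_user > last_assistant
-- ===== Notes on version B (the rewrite author's own statement) =====
-- stated objective: alternative
-- what changed: Replaces the reversed scan with early returns by a single forward pass that records the integer index of the last assistant message and of the last qualifying user message, returning whether the user index exceeds the assistant index.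
import Mathlib
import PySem

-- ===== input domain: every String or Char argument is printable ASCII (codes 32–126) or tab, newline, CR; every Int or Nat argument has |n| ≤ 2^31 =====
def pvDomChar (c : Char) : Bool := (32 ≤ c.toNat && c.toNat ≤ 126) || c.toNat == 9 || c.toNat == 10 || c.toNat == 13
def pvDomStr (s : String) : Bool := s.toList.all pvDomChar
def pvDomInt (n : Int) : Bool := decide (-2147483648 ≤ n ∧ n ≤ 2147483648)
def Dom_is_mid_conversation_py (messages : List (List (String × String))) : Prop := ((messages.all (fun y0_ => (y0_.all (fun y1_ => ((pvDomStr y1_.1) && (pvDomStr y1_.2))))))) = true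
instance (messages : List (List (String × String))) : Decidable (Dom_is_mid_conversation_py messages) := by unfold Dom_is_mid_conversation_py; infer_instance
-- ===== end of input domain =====

-- B replaces A's reversed scan with early returns by one forward pass recording the
-- indices of the last assistant and last qualifying user message (objective: alternative).

-- ===== PORT A =====
-- msg.get(k, dflt): first-match lookup in the association list (Python dict lookup)
def pvDictGetD (msg : List (String × String)) (k dflt : String) : String :=
  ((msg.find? (fun kv => kv.1 == k)).map (fun kv => kv.2)).getD dflt

-- the 'for msg in reversed(messages)' loop with its early returns, as structural recursion
def aLoop : List (List (String × String)) → Bool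
  | [] => false
  | msg :: rest =>
    let role := pvDictGetD msg "role" ""
    if role == "assistant" then false
    else if role == "user" then
      let content := pvDictGetD msg "content" ""
      if !(PySem.Str.startswith content "[A2A") then true else aLoop rest
    else aLoop rest

def is_mid_conversation_py (messages : List (List (String × String))) : Bool :=
  if messages.isEmpty then false else aLoop messages.reverse

-- ===== PORT B =====
-- the 'for i, msg in enumerate(messages)' loop: carries the running index and the
-- two last-seen indices (last_user, last_assistant), returning the final pair
def bLoop : List (List (String × String)) → Int → Int → Int → Int × Int
  | [], _, last_user, last_assistant => (last_user, last_assistant)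
  | msg :: rest, i, last_user, last_assistant =>
    let role := pvDictGetD msg "role" ""
    if role == "assistant" then bLoop rest (i + 1) last_user i
    else if role == "user" then
      let content := pvDictGetD msg "content" ""
      if !(PySem.Str.startswith content "[A2A") then bLoop rest (i + 1) i last_assistant
      else bLoop rest (i + 1) last_user last_assistant
    else bLoop rest (i + 1) last_user last_assistant

def is_mid_conversation_py_alt (messages : List (List (String × String))) : Bool :=
  if messages.isEmpty then false
  else
    let p := bLoop messages 0 (-1) (-1)
    decide (p.1 > p.2)

-- ===== PRECONDITION & SPEC =====
def Spec_is_mid_conversation_py (messages : List (List (String × String))) (out : Bool) : Prop := out = is_mid_conversation_py_alt messages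
instance (messages : List (List (String × String))) (out : Bool) : Decidable (Spec_is_mid_conversation_py messages out) := by unfold Spec_is_mid_conversation_py; infer_instance

-- ===== CLAIM (what is proved, stated in full; the proofs are below) =====
def Claim_equal_is_mid_conversation_py : Prop := ∀ (messages : List (List (String × String))), Dom_is_mid_conversation_py messages → Spec_is_mid_conversation_py messages (is_mid_conversation_py messages)

-- ===== LEMMAS AND PROOFS =====

-- the decision a single message contributes to A's backward scan (none = skipped)
def pvDec (msg : List (String × String)) : Option Bool :=
  let role := pvDictGetD msg "role" ""
  if role == "assistant" then some false
  else if role == "user" then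
    (if !(PySem.Str.startswith (pvDictGetD msg "content" "") "[A2A") then some true else none)
  else none

theorem aLoop_eq_findSome (l : List (List (String × String))) :
    aLoop l = (l.findSome? pvDec).getD false := by
  induction l with
  | nil => rfl
  | cons m t ih =>
    simp only [aLoop, pvDec, List.findSome?_cons]
    split_ifs <;> simp [ih]

-- B's index pair, compared, equals the last decision in the list (default: the
-- comparison of the incoming indices), provided both indices are below the counter.
theorem bLoop_gt (l : List (List (String × String))) (i lu la : Int)
    (hu : lu < i) (ha : la < i) :
    decide ((bLoop l i lu la).1 > (bLoop l i lu la).2)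
      = (l.reverse.findSome? pvDec).getD (decide (lu > la)) := by
  induction l generalizing i lu la with
  | nil => rfl
  | cons m t ih =>
    simp only [bLoop, pvDec, List.reverse_cons, List.findSome?_append, List.findSome?_cons,
      List.findSome?_nil]
    split_ifs with h1 h2 h3
    · rw [ih _ _ _ (by omega) (by omega)]
      cases t.reverse.findSome? pvDec <;> simp <;> omega
    · rw [ih _ _ _ (by omega) (by omega)]
      cases t.reverse.findSome? pvDec <;> simp <;> omega
    · rw [ih (i + 1) lu la (by omega) (by omega)]
      cases t.reverse.findSome? pvDec <;> rfl
    · rw [ih (i + 1) lu la (by omega) (by omega)]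
      cases t.reverse.findSome? pvDec <;> rfl

-- ===== VERDICT (by name: the statement is the Claim_ definition above) =====
theorem is_mid_conversation_py_spec : Claim_equal_is_mid_conversation_py := by
  intro messages _
  unfold Spec_is_mid_conversation_py is_mid_conversation_py is_mid_conversation_py_alt
  cases messages with
  | nil => rfl
  | cons m t =>
    simp only [List.isEmpty_cons, Bool.false_eq_true, if_false]
    rw [aLoop_eq_findSome, bLoop_gt _ _ _ _ (by omega) (by omega)]
    rfl
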